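-- pv_equiv track=rewrite | github.com/pnnl/MELON | src/industry.py | day_calculation
-- ===== SOURCE A (Python) =====
-- def day_calculation(start_day, number_of_days_in_one_year):
--     day_list = ['Monday', 'Tuesday', 'Wednesday', 'Thursday', 'Friday', 'Saturday', 'Sunday']
--     month_day = {'Jan': 31,
--                  'Feb': 28,
--                  'Mar': 31,
--                  'Apr': 30,
--                  'May': 31,
--                  'Jun': 30,
--                  'Jul': 31,
--                  'Aug': 31,
--                  'Sep': 30,
--                  'Oct': 31,
--                  'Nov': 30,
--                  'Dec': 31}
--     if number_of_days_in_one_year == 366: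
--         month_day['Feb'] = 29
--     # Identify the index in the day_list for start_day
--     day_index = day_list.index(start_day)
--     month_day_rec = []# month-day
--     day_rec = []# Monday, Tuesday, Wednesday, Thursday, Friday, Saturday, or Sunday
--     season_day_rec = []# peak_wkdy, peak_wknd, offpeak_wkdy, offpeak_wknd
--     for key in month_day:
--         for i in range(month_day[key]):
--             month_day_rec.append(key + '-' + str(i+1))
--             day_rec.append(day_list[day_index])
--             if key in ['May', 'Jun', 'Jul', 'Aug', 'Sep']:
--                 if day_index == 5 or day_index == 6:
--                     season_day_rec.append('peak_wknd')
--                 else: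
--                     season_day_rec.append('peak_wkdy')
--             else:
--                 if day_index == 5 or day_index == 6:
--                     season_day_rec.append('offpeak_wknd')
--                 else:
--                     season_day_rec.append('offpeak_wkdy')
--             if day_index == 6:
--                 day_index = 0
--             else:
--                 day_index += 1
--     return month_day_rec, day_rec, season_day_rec
-- ===== SOURCE B (Python) =====
-- def day_calculation(start_day, number_of_days_in_one_year):
--     day_list = ['Monday', 'Tuesday', 'Wednesday', 'Thursday', 'Friday', 'Saturday', 'Sunday']
--     i = day_list.index(start_day)
--     # weekday names as a rotated week, tiled over the year and truncated
--     week = day_list[i:] + day_list[:i]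
--     feb = 29 if number_of_days_in_one_year == 366 else 28
--     months = [('Jan', 31), ('Feb', feb), ('Mar', 31), ('Apr', 30), ('May', 31), ('Jun', 30),
--               ('Jul', 31), ('Aug', 31), ('Sep', 30), ('Oct', 31), ('Nov', 30), ('Dec', 31)]
--     total = sum(n for _, n in months)
--     day_rec = (week * ((total + 6) // 7))[:total]
--     month_day_rec = [k + '-' + str(d) for k, n in months for d in range(1, n + 1)]
--     month_of_day = [k for k, n in months for _ in range(n)]
--     summer = {'May', 'Jun', 'Jul', 'Aug', 'Sep'}
--     weekend = {'Saturday', 'Sunday'}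
--     season_day_rec = [('peak_' if m in summer else 'offpeak_') +
--                       ('wknd' if d in weekend else 'wkdy')
--                       for m, d in zip(month_of_day, day_rec)]
--     return month_day_rec, day_rec, season_day_rec
-- ===== Notes on version B (the rewrite author's own statement) =====
-- stated objective: alternative
-- what changed: Replaced A's single interleaved loop with a mutating wrap-around weekday counter and three append-accumulators by a rotate-and-tile construction: the week list is rotated to start at start_day, repeated and truncated to the year's length to give the weekday column directly, and the season tags are derived by zipping the expanded month-name column against the weekday NAMES (weekend test on the name, no index arithmetic).
import Mathlib
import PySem

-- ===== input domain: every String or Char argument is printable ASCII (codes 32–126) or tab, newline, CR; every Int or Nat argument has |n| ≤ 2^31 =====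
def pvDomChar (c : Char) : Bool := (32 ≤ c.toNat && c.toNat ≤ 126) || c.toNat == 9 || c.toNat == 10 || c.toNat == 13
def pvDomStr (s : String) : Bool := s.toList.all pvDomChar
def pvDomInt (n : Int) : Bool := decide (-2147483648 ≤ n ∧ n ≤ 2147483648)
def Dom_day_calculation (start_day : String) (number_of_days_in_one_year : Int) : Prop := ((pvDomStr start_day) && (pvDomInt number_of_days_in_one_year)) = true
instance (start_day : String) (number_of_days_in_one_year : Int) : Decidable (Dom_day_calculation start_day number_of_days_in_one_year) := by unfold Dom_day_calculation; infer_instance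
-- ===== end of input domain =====

-- B replaces A's single stateful loop (a mutating wrap-around weekday counter feeding three
-- append-accumulators) by rotate-and-tile: the week list is rotated to start at start_day,
-- repeated and truncated to the year, and the season tags are derived by zipping month names
-- with the weekday NAMES (no index arithmetic). Objective: alternative decomposition, same cost.

-- ===== PORT A =====
-- shared literal: the day_list both Pythons write out
def pvDayList : List String := ["Monday", "Tuesday", "Wednesday", "Thursday", "Friday", "Saturday", "Sunday"]
-- the summer-month list A tests membership in
def pvSummer : List String := ["May", "Jun", "Jul", "Aug", "Sep"]
-- A's loop body for one day: appends to the three accumulators exactly as A does,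
-- then advances the wrap-around weekday counter.
def pvStepA (key : String) (st : Nat × List String × List String × List String) (i : Int) :
    Nat × List String × List String × List String :=
  let di := st.1
  let m := st.2.1 ++ [key ++ "-" ++ PySem.Int.toStr (i + 1)]
  let d := st.2.2.1 ++ [(PySem.List.pyGet? pvDayList (Int.ofNat di)).getD ""]
  let s := st.2.2.2 ++ [if key ∈ pvSummer then
                          (if di = 5 ∨ di = 6 then "peak_wknd" else "peak_wkdy")
                        else
                          (if di = 5 ∨ di = 6 then "offpeak_wknd" else "offpeak_wkdy")]
  (if di = 6 then 0 else di + 1, m, d, s)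

def day_calculation (start_day : String) (number_of_days_in_one_year : Int) : List String × List String × List String :=
  let month_day : PySem.Dict String Int :=
    PySem.Dict.ofList [("Jan", 31), ("Feb", 28), ("Mar", 31), ("Apr", 30), ("May", 31), ("Jun", 30),
                       ("Jul", 31), ("Aug", 31), ("Sep", 30), ("Oct", 31), ("Nov", 30), ("Dec", 31)]
  let month_day := if number_of_days_in_one_year = 366 then month_day.insert "Feb" 29 else month_day
  match PySem.List.index? pvDayList start_day with
  | none => ([], [], [])   -- A raises ValueError here; excluded by Pre_
  | some di0 =>
    let r := month_day.keys.foldl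
      (fun st key => (PySem.List.pyRange 0 (month_day.getD key 0) 1).foldl (pvStepA key) st)
      (di0, ([] : List String), ([] : List String), ([] : List String))
    (r.2.1, r.2.2.1, r.2.2.2)

-- ===== PORT B =====
def day_calculation_alt (start_day : String) (number_of_days_in_one_year : Int) : List String × List String × List String :=
  match PySem.List.index? pvDayList start_day with
  | none => ([], [], [])   -- day_list.index raises ValueError in Python; excluded by Pre_
  | some i =>
    -- week = day_list[i:] + day_list[:i]
    let week := PySem.List.slice pvDayList (some (Int.ofNat i)) none ++
                PySem.List.slice pvDayList none (some (Int.ofNat i))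
    let feb : Int := if number_of_days_in_one_year = 366 then 29 else 28
    let months : List (String × Int) :=
      [("Jan", 31), ("Feb", feb), ("Mar", 31), ("Apr", 30), ("May", 31), ("Jun", 30),
       ("Jul", 31), ("Aug", 31), ("Sep", 30), ("Oct", 31), ("Nov", 30), ("Dec", 31)]
    let total : Int := (months.map (fun p => p.2)).sum
    -- (week * ((total + 6) // 7))[:total]  — Python list repetition = replicate+flatten
    let day_rec := PySem.List.slice
      ((List.replicate (PySem.Int.floordiv (total + 6) 7).toNat week).flatten) none (some total)
    let month_day_rec := months.flatMap
      (fun p => (PySem.List.pyRange 1 (p.2 + 1) 1).map (fun d => p.1 ++ "-" ++ PySem.Int.toStr d))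
    let month_of_day := months.flatMap
      (fun p => (PySem.List.pyRange 0 p.2 1).map (fun _ => p.1))
    let summer := PySem.Set.ofList ["May", "Jun", "Jul", "Aug", "Sep"]
    let weekend := PySem.Set.ofList ["Saturday", "Sunday"]
    let season_day_rec := (month_of_day.zip day_rec).map
      (fun md => (if md.1 ∈ summer then "peak_" else "offpeak_") ++
                 (if md.2 ∈ weekend then "wknd" else "wkdy"))
    (month_day_rec, day_rec, season_day_rec)

-- ===== PRECONDITION & SPEC =====
-- Pre_ excludes start_day not among the seven weekday names, where A's day_list.index raises ValueError.
def Pre_day_calculation (start_day : String) (number_of_days_in_one_year : Int) : Prop :=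
  start_day ∈ ["Monday", "Tuesday", "Wednesday", "Thursday", "Friday", "Saturday", "Sunday"]
instance (start_day : String) (number_of_days_in_one_year : Int) : Decidable (Pre_day_calculation start_day number_of_days_in_one_year) := by unfold Pre_day_calculation; infer_instance
def pvWitness_day_calculation : String × Int := ("Wednesday", 365)

def Spec_day_calculation (start_day : String) (number_of_days_in_one_year : Int) (out : List String × List String × List String) : Prop := out = day_calculation_alt start_day number_of_days_in_one_year
instance (start_day : String) (number_of_days_in_one_year : Int) (out : List String × List String × List String) : Decidable (Spec_day_calculation start_day number_of_days_in_one_year out) := by unfold Spec_day_calculation; infer_instance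

-- ===== CLAIM (what is proved, stated in full; the proofs are below) =====
def Claim_equal_day_calculation : Prop := ∀ (start_day : String) (number_of_days_in_one_year : Int), Dom_day_calculation start_day number_of_days_in_one_year → Pre_day_calculation start_day number_of_days_in_one_year → Spec_day_calculation start_day number_of_days_in_one_year (day_calculation start_day number_of_days_in_one_year)

-- ===== LEMMAS AND PROOFS =====

-- specification pieces both sides are reduced to
def pvMSeg (key : String) (c : Nat) : List String :=
  (List.range c).map (fun (i : Nat) => key ++ "-" ++ PySem.Int.toStr ((i : Int) + 1))
def pvDSeg (di c : Nat) : List String :=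
  (List.range c).map (fun t => pvDayList.getD ((di + t) % 7) "")
def pvSSeg (key : String) (di c : Nat) : List String :=
  (List.range c).map (fun t =>
    (if key ∈ pvSummer then "peak_" else "offpeak_") ++ (if 5 ≤ (di + t) % 7 then "wknd" else "wkdy"))

def pvM : List (String × Int) → List String
  | [] => []
  | p :: ms => pvMSeg p.1 p.2.toNat ++ pvM ms
def pvD (di : Nat) : List (String × Int) → List String
  | [] => []
  | p :: ms => pvDSeg di p.2.toNat ++ pvD ((di + p.2.toNat) % 7) ms
def pvS (di : Nat) : List (String × Int) → List String
  | [] => []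
  | p :: ms => pvSSeg p.1 di p.2.toNat ++ pvS ((di + p.2.toNat) % 7) ms
def pvTot : List (String × Int) → Nat
  | [] => 0
  | p :: ms => p.2.toNat + pvTot ms
-- expanded month-name list (B's month_of_day)
def pvNames : List (String × Int) → List String
  | [] => []
  | p :: ms => List.replicate p.2.toNat p.1 ++ pvNames ms
-- the rotated week B builds
def pvRot (di : Nat) : List String := pvDayList.drop di ++ pvDayList.take di

theorem pvMSeg_succ (key : String) (c : Nat) :
    pvMSeg key (c + 1) = pvMSeg key c ++ [key ++ "-" ++ PySem.Int.toStr ((c : Int) + 1)] := by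
  simp [pvMSeg, List.range_succ]
theorem pvDSeg_succ (di c : Nat) :
    pvDSeg di (c + 1) = pvDSeg di c ++ [pvDayList.getD ((di + c) % 7) ""] := by
  simp [pvDSeg, List.range_succ]
theorem pvSSeg_succ (key : String) (di c : Nat) :
    pvSSeg key di (c + 1) = pvSSeg key di c ++
      [(if key ∈ pvSummer then "peak_" else "offpeak_") ++
       (if 5 ≤ (di + c) % 7 then "wknd" else "wkdy")] := by
  simp [pvSSeg, List.range_succ]

-- A's positional day_list lookup at a counter value < 7 is a total getD
theorem pvGetBridge (di : Nat) (h : di < 7) :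
    (PySem.List.pyGet? pvDayList (Int.ofNat di)).getD "" = pvDayList.getD di "" := by
  interval_cases di <;> rfl

-- A's season string at counter value x < 7 equals B's two-part concatenation
theorem pvSeasonBridge (key : String) (x : Nat) (h : x < 7) :
    (if key ∈ pvSummer then
       (if x = 5 ∨ x = 6 then "peak_wknd" else "peak_wkdy")
     else
       (if x = 5 ∨ x = 6 then "offpeak_wknd" else "offpeak_wkdy"))
    = (if key ∈ pvSummer then "peak_" else "offpeak_") ++ (if 5 ≤ x then "wknd" else "wkdy") := by
  by_cases hk : key ∈ pvSummer <;> simp only [hk, if_true, if_false] <;>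
    interval_cases x <;> decide

-- one month of A's loop
theorem pvLoopMonth (key : String) (c : Nat) : ∀ (di : Nat) (m d s : List String), di < 7 →
    (PySem.List.pyRange 0 (c : Int) 1).foldl (pvStepA key) (di, m, d, s)
      = ((di + c) % 7, m ++ pvMSeg key c, d ++ pvDSeg di c, s ++ pvSSeg key di c) := by
  induction c with
  | zero =>
    intro di m d s h
    simp [PySem.List.pyRange_one_eq_nil le_rfl, pvMSeg, pvDSeg, pvSSeg, Nat.mod_eq_of_lt h]
  | succ c ih =>
    intro di m d s h
    have hcast : ((c + 1 : Nat) : Int) = (c : Int) + 1 := by push_cast; ring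
    rw [hcast, PySem.List.pyRange_one_succ_right (by positivity), List.foldl_append,
        ih di m d s h, List.foldl_cons, List.foldl_nil,
        pvMSeg_succ, pvDSeg_succ, pvSSeg_succ]
    have h7 : (di + c) % 7 < 7 := Nat.mod_lt _ (by norm_num)
    simp only [pvStepA]
    rw [pvGetBridge _ h7, pvSeasonBridge key _ h7,
        show (if (di + c) % 7 = 6 then 0 else (di + c) % 7 + 1) = (di + (c + 1)) % 7 from by
          split_ifs <;> omega]
    simp [List.append_assoc]

-- A's whole loop over a month list with nonnegative counts
theorem pvLoopAll : ∀ (ms : List (String × Int)) (di : Nat) (m d s : List String), di < 7 →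
    (∀ p ∈ ms, 0 ≤ p.2) →
    ms.foldl (fun st p => (PySem.List.pyRange 0 p.2 1).foldl (pvStepA p.1) st) (di, m, d, s)
      = ((di + pvTot ms) % 7, m ++ pvM ms, d ++ pvD di ms, s ++ pvS di ms) := by
  intro ms
  induction ms with
  | nil =>
    intro di m d s h _
    simp [pvM, pvD, pvS, pvTot, Nat.mod_eq_of_lt h]
  | cons p ms ih =>
    intro di m d s h hpos
    have hp : (0 : Int) ≤ p.2 := hpos p (List.mem_cons_self ..)
    have hc : p.2 = ((p.2.toNat : Nat) : Int) := (Int.toNat_of_nonneg hp).symm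
    rw [List.foldl_cons]
    conv_lhs => rw [hc]
    rw [pvLoopMonth p.1 p.2.toNat di m d s h,
        ih _ _ _ _ (Nat.mod_lt _ (by norm_num)) (fun q hq => hpos q (List.mem_cons_of_mem _ hq)),
        show pvM (p :: ms) = pvMSeg p.1 p.2.toNat ++ pvM ms from rfl,
        show pvD di (p :: ms) = pvDSeg di p.2.toNat ++ pvD ((di + p.2.toNat) % 7) ms from rfl,
        show pvS di (p :: ms) = pvSSeg p.1 di p.2.toNat ++ pvS ((di + p.2.toNat) % 7) ms from rfl,
        show ((di + p.2.toNat) % 7 + pvTot ms) % 7 = (di + pvTot (p :: ms)) % 7 from by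
          show _ = (di + (p.2.toNat + pvTot ms)) % 7; omega]
    simp [List.append_assoc]

-- ---- B-side characterisations ----

-- B's month_day_rec pass
theorem pvMonthB : ∀ (ms : List (String × Int)), (∀ p ∈ ms, 0 ≤ p.2) →
    ms.flatMap (fun p => (PySem.List.pyRange 1 (p.2 + 1) 1).map
        (fun d => p.1 ++ "-" ++ PySem.Int.toStr d))
      = pvM ms := by
  intro ms
  induction ms with
  | nil => intro _; rfl
  | cons p ms ih =>
    intro hpos
    have hp : (0 : Int) ≤ p.2 := hpos p (List.mem_cons_self ..)
    have hc : p.2 = ((p.2.toNat : Nat) : Int) := (Int.toNat_of_nonneg hp).symm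
    rw [List.flatMap_cons, ih (fun q hq => hpos q (List.mem_cons_of_mem _ hq))]
    conv_lhs => rw [hc]
    rw [PySem.List.pyRange_one, List.map_map,
        show pvM (p :: ms) = pvMSeg p.1 p.2.toNat ++ pvM ms from rfl]
    congr 1
    rw [show (((p.2.toNat : Nat) : Int) + 1 - 1).toNat = p.2.toNat from by omega]
    unfold pvMSeg
    apply List.map_congr_left
    intro k _
    simp [Function.comp, Int.add_comm]

-- B's month_of_day pass
theorem pvNamesB : ∀ (ms : List (String × Int)), (∀ p ∈ ms, 0 ≤ p.2) →
    ms.flatMap (fun p => (PySem.List.pyRange 0 p.2 1).map (fun _ => p.1)) = pvNames ms := by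
  intro ms
  induction ms with
  | nil => intro _; rfl
  | cons p ms ih =>
    intro hpos
    have hp : (0 : Int) ≤ p.2 := hpos p (List.mem_cons_self ..)
    have hc : p.2 = ((p.2.toNat : Nat) : Int) := (Int.toNat_of_nonneg hp).symm
    rw [List.flatMap_cons, ih (fun q hq => hpos q (List.mem_cons_of_mem _ hq))]
    conv_lhs => rw [hc]
    rw [PySem.List.pyRange_one, List.map_map,
        show pvNames (p :: ms) = List.replicate p.2.toNat p.1 ++ pvNames ms from rfl,
        show (((p.2.toNat : Nat) : Int) - 0).toNat = p.2.toNat from by omega]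
    congr 1
    simp [Function.comp_def, List.map_const']

-- the rotated week: length and small takes
theorem pvRot_length (di : Nat) (h : di < 7) : (pvRot di).length = 7 := by
  unfold pvRot
  rw [List.length_append, List.length_drop, List.length_take]
  show 7 - di + min di 7 = 7
  omega

theorem pvRot_take (di n : Nat) (h : di < 7) (hn : n ≤ 7) :
    (pvRot di).take n = (List.range n).map (fun t => pvDayList.getD ((di + t) % 7) "") := by
  interval_cases di <;> interval_cases n <;> rfl

-- tiling: a prefix of the repeated rotated week is the modular weekday sequence
theorem pvTile (di : Nat) (h : di < 7) : ∀ (k n : Nat), n ≤ 7 * k →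
    ((List.replicate k (pvRot di)).flatten).take n
      = (List.range n).map (fun t => pvDayList.getD ((di + t) % 7) "") := by
  intro k
  induction k with
  | zero =>
    intro n hn
    have : n = 0 := by omega
    subst this; rfl
  | succ k ih =>
    intro n hn
    rw [List.replicate_succ, List.flatten_cons]
    by_cases h7 : n ≤ 7
    · rw [List.take_append_of_le_length (by rw [pvRot_length di h]; exact h7),
          pvRot_take di n h h7]
    · rw [List.take_append,
          List.take_of_length_le (by rw [pvRot_length di h]; omega),
          pvRot_length di h, ih (n - 7) (by omega)]
      have hsplit : n = 7 + (n - 7) := by omega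
      conv_rhs => rw [hsplit, List.range_add, List.map_append, List.map_map]
      congr 1
      · rw [show (pvRot di) = (pvRot di).take 7 from by
            rw [List.take_of_length_le (by rw [pvRot_length di h])],
          pvRot_take di 7 h le_rfl]
      · apply List.map_congr_left
        intro t _
        simp only [Function.comp]
        congr 1
        omega

-- zipping a replicated head against any list of that length
theorem pvZipRep {α β : Type} (x : α) : ∀ (l : List β),
    (List.replicate l.length x).zip l = l.map (fun y => (x, y)) := by
  intro l
  induction l with
  | nil => rfl
  | cons y l ih => simp [List.replicate_succ, ih]

-- the weekday name at modular index x is a weekend name iff 5 ≤ x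
theorem pvWkndBridge (x : Nat) (h : x < 7) :
    (if pvDayList.getD x "" ∈ (["Saturday", "Sunday"] : List String) then "wknd" else "wkdy")
      = if 5 ≤ x then "wknd" else "wkdy" := by
  interval_cases x <;> rfl

-- B's season pass: month names zipped against the modular weekday sequence
theorem pvSeasonB : ∀ (ms : List (String × Int)) (di : Nat), di < 7 →
    ((pvNames ms).zip ((List.range (pvTot ms)).map
        (fun t => pvDayList.getD ((di + t) % 7) ""))).map
      (fun md => (if md.1 ∈ pvSummer then "peak_" else "offpeak_") ++
                 (if md.2 ∈ (["Saturday", "Sunday"] : List String) then "wknd" else "wkdy"))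
      = pvS di ms := by
  intro ms
  induction ms with
  | nil => intro di _; rfl
  | cons p ms ih =>
    intro di h7
    rw [show pvNames (p :: ms) = List.replicate p.2.toNat p.1 ++ pvNames ms from rfl,
        show pvTot (p :: ms) = p.2.toNat + pvTot ms from rfl,
        List.range_add, List.map_append,
        List.zip_append (by simp), List.map_append]
    have hfst : (List.replicate p.2.toNat p.1).zip
          ((List.range p.2.toNat).map (fun t => pvDayList.getD ((di + t) % 7) ""))
        = ((List.range p.2.toNat).map (fun t => pvDayList.getD ((di + t) % 7) "")).map
            (fun y => (p.1, y)) := by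
      rw [← pvZipRep p.1 ((List.range p.2.toNat).map
            (fun t => pvDayList.getD ((di + t) % 7) ""))]
      simp
    rw [hfst, List.map_map, List.map_map, List.map_map]
    have htail : List.map
          ((fun t => pvDayList.getD ((di + t) % 7) "") ∘ (fun x => p.2.toNat + x))
          (List.range (pvTot ms))
        = (List.range (pvTot ms)).map
            (fun t => pvDayList.getD (((di + p.2.toNat) % 7 + t) % 7) "") := by
      apply List.map_congr_left
      intro t _
      simp only [Function.comp]
      congr 1
      omega
    rw [htail, ih ((di + p.2.toNat) % 7) (Nat.mod_lt _ (by norm_num)),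
        show pvS di (p :: ms) = pvSSeg p.1 di p.2.toNat ++ pvS ((di + p.2.toNat) % 7) ms from rfl]
    congr 1
    unfold pvSSeg
    apply List.map_congr_left
    intro t _
    simp only [Function.comp]
    congr 1
    exact pvWkndBridge _ (Nat.mod_lt _ (by norm_num))

-- concrete month tables
def pvMonths365 : List (String × Int) :=
  [("Jan", 31), ("Feb", 28), ("Mar", 31), ("Apr", 30), ("May", 31), ("Jun", 30),
   ("Jul", 31), ("Aug", 31), ("Sep", 30), ("Oct", 31), ("Nov", 30), ("Dec", 31)]
def pvMonths366 : List (String × Int) :=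
  [("Jan", 31), ("Feb", 29), ("Mar", 31), ("Apr", 30), ("May", 31), ("Jun", 30),
   ("Jul", 31), ("Aug", 31), ("Sep", 30), ("Oct", 31), ("Nov", 30), ("Dec", 31)]

-- B's rotated-week slices form pvRot
theorem pvWeekRot (i : Nat) :
    PySem.List.slice pvDayList (some (Int.ofNat i)) none ++
      PySem.List.slice pvDayList none (some (Int.ofNat i)) = pvRot i := by
  rw [Int.ofNat_eq_natCast, PySem.List.slice_from_natCast, PySem.List.slice_to_natCast]
  rfl

-- B's whole body over a month table with total T days, T = pvTot ms, T ≤ 7·53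
theorem pvAltChar (ms : List (String × Int)) (hpos : ∀ p ∈ ms, 0 ≤ p.2) (di0 : Nat) (h7 : di0 < 7)
    (T : Int) (hT : (ms.map (fun p => p.2)).sum = T)
    (hTot : T.toNat = pvTot ms) (h0 : 0 ≤ T) (hbound : T.toNat ≤ 7 * (PySem.Int.floordiv (T + 6) 7).toNat) :
    ((ms.flatMap (fun p => (PySem.List.pyRange 1 (p.2 + 1) 1).map
        (fun d => p.1 ++ "-" ++ PySem.Int.toStr d)),
      PySem.List.slice ((List.replicate (PySem.Int.floordiv
        ((ms.map (fun p => p.2)).sum + 6) 7).toNat (pvRot di0)).flatten) none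
        (some ((ms.map (fun p => p.2)).sum)),
      ((ms.flatMap (fun p => (PySem.List.pyRange 0 p.2 1).map (fun _ => p.1))).zip
        (PySem.List.slice ((List.replicate (PySem.Int.floordiv
          ((ms.map (fun p => p.2)).sum + 6) 7).toNat (pvRot di0)).flatten) none
          (some ((ms.map (fun p => p.2)).sum)))).map
        (fun md => (if md.1 ∈ PySem.Set.ofList ["May", "Jun", "Jul", "Aug", "Sep"]
                      then "peak_" else "offpeak_") ++
                   (if md.2 ∈ PySem.Set.ofList ["Saturday", "Sunday"] then "wknd" else "wkdy")))
      : List String × List String × List String)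
      = (pvM ms, pvD di0 ms, pvS di0 ms) := by
  have hday : PySem.List.slice ((List.replicate (PySem.Int.floordiv
        ((ms.map (fun p => p.2)).sum + 6) 7).toNat (pvRot di0)).flatten) none
        (some ((ms.map (fun p => p.2)).sum))
      = (List.range (pvTot ms)).map (fun t => pvDayList.getD ((di0 + t) % 7) "") := by
    rw [hT, PySem.List.slice_to _ h0, pvTile di0 h7 _ _ hbound, hTot]
  have hpvD : (List.range (pvTot ms)).map (fun t => pvDayList.getD ((di0 + t) % 7) "")
      = pvD di0 ms := by
    clear hday hT hTot h0 hbound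
    induction ms generalizing di0 with
    | nil => rfl
    | cons p ms ih =>
      rw [show pvTot (p :: ms) = p.2.toNat + pvTot ms from rfl, List.range_add,
          List.map_append, List.map_map]
      have h2 : List.map ((fun t => pvDayList.getD ((di0 + t) % 7) "") ∘ (fun x => p.2.toNat + x))
          (List.range (pvTot ms))
          = List.map (fun t => pvDayList.getD (((di0 + p.2.toNat) % 7 + t) % 7) "")
          (List.range (pvTot ms)) := by
        apply List.map_congr_left
        intro t _
        simp only [Function.comp]
        congr 1
        omega
      rw [h2, ih (fun q hq => hpos q (List.mem_cons_of_mem _ hq)) _ (Nat.mod_lt _ (by norm_num))]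
      rfl
  simp only [Prod.mk.injEq]
  refine ⟨pvMonthB ms hpos, ?_, ?_⟩
  · rw [hday, hpvD]
  · rw [hday, pvNamesB ms hpos, ← pvSeasonB ms di0 h7]
    apply List.map_congr_left
    intro md _
    simp [PySem.Set.mem_ofList, pvSummer]

-- the heart: for any admitted start day the two ports agree
theorem pvSame (sd : String) (n : Int) (di0 : Nat) (h7 : di0 < 7)
    (hidx : PySem.List.index? pvDayList sd = some di0) :
    day_calculation sd n = day_calculation_alt sd n := by
  have hpos365 : ∀ p ∈ pvMonths365, (0 : Int) ≤ p.2 := by decide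
  have hpos366 : ∀ p ∈ pvMonths366, (0 : Int) ≤ p.2 := by decide
  by_cases h : n = 366
  · subst h
    simp only [day_calculation, day_calculation_alt, hidx, reduceIte]
    have hk : (PySem.Dict.ofList
        [("Jan", (31 : Int)), ("Feb", 28), ("Mar", 31), ("Apr", 30), ("May", 31), ("Jun", 30),
         ("Jul", 31), ("Aug", 31), ("Sep", 30), ("Oct", 31), ("Nov", 30), ("Dec", 31)]
        |>.insert "Feb" 29).keys = pvMonths366.map Prod.fst := by decide
    rw [hk, List.foldl_map,
        PySem.List.foldl_congr_mem _ _
          (fun st (p : String × Int) => (PySem.List.pyRange 0 p.2 1).foldl (pvStepA p.1) st) _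
          (by intro acc p hp; fin_cases hp <;> rfl),
        pvLoopAll pvMonths366 di0 [] [] [] h7 hpos366]
    have hB := pvAltChar pvMonths366 hpos366 di0 h7 366 (by decide) (by decide) (by decide) (by decide)
    rw [← pvWeekRot di0] at hB
    simp only [pvMonths366] at hB
    rw [hB]
    simp [pvMonths366]
  · simp only [day_calculation, day_calculation_alt, hidx, if_neg h]
    have hk : (PySem.Dict.ofList
        [("Jan", (31 : Int)), ("Feb", 28), ("Mar", 31), ("Apr", 30), ("May", 31), ("Jun", 30),
         ("Jul", 31), ("Aug", 31), ("Sep", 30), ("Oct", 31), ("Nov", 30), ("Dec", 31)]).keys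
        = pvMonths365.map Prod.fst := by decide
    rw [hk, List.foldl_map,
        PySem.List.foldl_congr_mem _ _
          (fun st (p : String × Int) => (PySem.List.pyRange 0 p.2 1).foldl (pvStepA p.1) st) _
          (by intro acc p hp; fin_cases hp <;> rfl),
        pvLoopAll pvMonths365 di0 [] [] [] h7 hpos365]
    have hB := pvAltChar pvMonths365 hpos365 di0 h7 365 (by decide) (by decide) (by decide) (by decide)
    rw [← pvWeekRot di0] at hB
    simp only [pvMonths365] at hB
    rw [hB]
    simp [pvMonths365]

-- ===== VERDICT (by name: the statement is the Claim_ definition above) =====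
theorem day_calculation_spec : Claim_equal_day_calculation := by
  intro sd n _ hpre
  unfold Spec_day_calculation
  unfold Pre_day_calculation at hpre
  simp only [List.mem_cons, List.not_mem_nil, or_false] at hpre
  rcases hpre with rfl | rfl | rfl | rfl | rfl | rfl | rfl
  · exact pvSame _ n 0 (by norm_num) (by decide)
  · exact pvSame _ n 1 (by norm_num) (by decide)
  · exact pvSame _ n 2 (by norm_num) (by decide)
  · exact pvSame _ n 3 (by norm_num) (by decide)
  · exact pvSame _ n 4 (by norm_num) (by decide)
  · exact pvSame _ n 5 (by norm_num) (by decide)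
  · exact pvSame _ n 6 (by norm_num) (by decide)
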